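-- pv_equiv track=rewrite | github.com/amshrestha2020/CodeSignal | CodeSignal/InterviewPractices/sumInRange.py | solution
-- ===== SOURCE A (Python) =====
-- def solution(nums, queries):
--     # Calculate the prefix sum array
--     prefix_sum = [0]
--     for num in nums:
--         prefix_sum.append(prefix_sum[-1] + num)
--
--     # Initialize the total sum to 0
--     total_sum = 0
--
--     # Iterate over the queries
--     for query in queries:
--         # Calculate the sum of the elements in nums from the indices at query[0] to query[1] (inclusive)
--         query_sum = prefix_sum[query[1] + 1] - prefix_sum[query[0]]
--
--         # Add the query sum to the total sum
--         total_sum += query_sum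
--
--     # Return the total sum modulo 10^9 + 7
--     return total_sum % (10**9 + 7)
-- ===== SOURCE B (Python) =====
-- def solution(nums, queries):
--     # Difference array: count how many queries cover each index, then one weighted pass.
--     diff = [0] * (len(nums) + 1)
--     for query in queries:
--         diff[query[0]] += 1
--         diff[query[1] + 1] -= 1
--     total = 0
--     cover = 0
--     for i in range(len(nums)):
--         cover += diff[i]
--         total += cover * nums[i]
--     return total % (10**9 + 7)
-- ===== Notes on version B (the rewrite author's own statement) =====
-- stated objective: alternative
-- what changed: Replaces the prefix-sum array and per-query lookups by a difference array built from the queries, a running cumulative coverage weight, and one weighted pass over nums; Pre_ excludes only inputs where A raises IndexError (a query shorter than 2 or an index outside the length-(n+1) range).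
import Mathlib
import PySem

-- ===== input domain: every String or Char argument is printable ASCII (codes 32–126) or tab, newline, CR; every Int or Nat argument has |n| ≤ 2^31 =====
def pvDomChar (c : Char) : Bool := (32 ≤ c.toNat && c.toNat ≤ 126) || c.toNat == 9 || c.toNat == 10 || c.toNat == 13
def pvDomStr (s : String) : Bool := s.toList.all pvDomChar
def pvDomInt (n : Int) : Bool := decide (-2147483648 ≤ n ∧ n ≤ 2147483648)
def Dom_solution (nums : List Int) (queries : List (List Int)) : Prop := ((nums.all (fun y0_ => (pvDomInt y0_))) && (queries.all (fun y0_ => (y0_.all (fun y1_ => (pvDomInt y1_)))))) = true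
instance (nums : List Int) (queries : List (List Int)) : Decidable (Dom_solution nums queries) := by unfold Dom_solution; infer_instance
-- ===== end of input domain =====

-- B replaces A's prefix-sum-then-query passes by a query-driven difference array with a
-- running coverage weight over nums (alternative decomposition, same asymptotic cost).

-- ===== PORT A =====
def solution (nums : List Int) (queries : List (List Int)) : Int :=
  let prefix_sum := nums.foldl (fun ps num => ps ++ [PySem.List.pyGetD ps (-1) 0 + num]) [(0 : Int)]
  let total_sum := queries.foldl (fun acc query =>
    acc + (PySem.List.pyGetD prefix_sum (PySem.List.pyGetD query 1 0 + 1) 0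
         - PySem.List.pyGetD prefix_sum (PySem.List.pyGetD query 0 0) 0)) 0
  PySem.Int.mod total_sum (10 ^ 9 + 7)

-- ===== PORT B =====
def solution_alt (nums : List Int) (queries : List (List Int)) : Int :=
  let diff0 : List Int := List.replicate (nums.length + 1) 0
  let diff := queries.foldl (fun d query =>
    let d1 := PySem.List.pySetD d (PySem.List.pyGetD query 0 0)
                (PySem.List.pyGetD d (PySem.List.pyGetD query 0 0) 0 + 1)
    PySem.List.pySetD d1 (PySem.List.pyGetD query 1 0 + 1)
      (PySem.List.pyGetD d1 (PySem.List.pyGetD query 1 0 + 1) 0 - 1)) diff0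
  let tc := (PySem.List.pyRange 0 (nums.length : Int) 1).foldl (fun (tc : Int × Int) i =>
    let cover := tc.2 + PySem.List.pyGetD diff i 0
    (tc.1 + cover * PySem.List.pyGetD nums i 0, cover)) ((0 : Int), (0 : Int))
  PySem.Int.mod tc.1 (10 ^ 9 + 7)

-- ===== PRECONDITION & SPEC =====
-- Pre_ = exactly the inputs where A returns (no IndexError): each query has ≥ 2 entries and
-- both prefix_sum reads (length n+1, Python negative indexing allowed) are in range.
def Pre_solution (nums : List Int) (queries : List (List Int)) : Prop :=
  ∀ q ∈ queries, 2 ≤ q.length ∧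
    PySem.Raise.InRange (nums.length + 1) (PySem.List.pyGetD q 0 0) ∧
    PySem.Raise.InRange (nums.length + 1) (PySem.List.pyGetD q 1 0 + 1)
instance (nums : List Int) (queries : List (List Int)) : Decidable (Pre_solution nums queries) := by
  unfold Pre_solution; infer_instance

def pvWitness_solution : List Int × List (List Int) := ([3, -1, 4, 1], [[0, 2], [1, 3], [-2, -1]])

def Spec_solution (nums : List Int) (queries : List (List Int)) (out : Int) : Prop := out = solution_alt nums queries
instance (nums : List Int) (queries : List (List Int)) (out : Int) : Decidable (Spec_solution nums queries out) := by unfold Spec_solution; infer_instance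

-- ===== CLAIM (what is proved, stated in full; the proofs are below) =====
def Claim_equal_solution : Prop := ∀ (nums : List Int) (queries : List (List Int)), Dom_solution nums queries → Pre_solution nums queries → Spec_solution nums queries (solution nums queries)

-- ===== LEMMAS AND PROOFS =====

-- normalised Python index into a length-(n+1) list
def pvNu (n : ℕ) (j : Int) : Int := if j ≥ 0 then j else j + (n : Int) + 1

-- per-query contribution, in "dropped suffix sums" form
def pvG (nums : List Int) (q : List Int) : Int :=
  (nums.drop (pvNu nums.length (PySem.List.pyGetD q 0 0)).toNat).sum
  - (nums.drop (pvNu nums.length (PySem.List.pyGetD q 1 0 + 1)).toNat).sum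

-- weighted value of a difference list
def pvW (nums : List Int) (d : List Int) : Int :=
  ∑ k ∈ Finset.range (nums.length + 1), d.getD k 0 * (nums.drop k).sum

-- B's per-query step, named for the lemmas
def pvStep (d : List Int) (query : List Int) : List Int :=
  let d1 := PySem.List.pySetD d (PySem.List.pyGetD query 0 0)
              (PySem.List.pyGetD d (PySem.List.pyGetD query 0 0) 0 + 1)
  PySem.List.pySetD d1 (PySem.List.pyGetD query 1 0 + 1)
    (PySem.List.pyGetD d1 (PySem.List.pyGetD query 1 0 + 1) 0 - 1)

-- ---- generic sum lemmas ----

theorem pv_sum_take (d : List Int) (m : ℕ) :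
    (d.take m).sum = ∑ k ∈ Finset.range m, d.getD k 0 := by
  induction m with
  | zero => simp
  | succ m ih =>
      rw [List.take_add_one, Finset.sum_range_succ, ← ih, List.sum_append]
      have : (d[m]?.toList).sum = d.getD m 0 := by
        cases h : d[m]? <;> simp [List.getD, h]
      omega

theorem pv_swap (f : ℕ → ℕ → Int) (n : ℕ) :
    ∑ i ∈ Finset.range n, ∑ k ∈ Finset.range (i + 1), f k i
      = ∑ k ∈ Finset.range n, ∑ i ∈ Finset.Ico k n, f k i := by
  induction n with
  | zero => simp
  | succ n ih =>
      have h1 : ∀ k ∈ Finset.range n, ∑ i ∈ Finset.Ico k (n + 1), f k i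
          = (∑ i ∈ Finset.Ico k n, f k i) + f k n := by
        intro k hk
        rw [Finset.sum_Ico_succ_top (le_of_lt (Finset.mem_range.mp hk))]
      have hR : ∑ k ∈ Finset.range (n + 1), ∑ i ∈ Finset.Ico k (n + 1), f k i
          = (∑ k ∈ Finset.range n, ∑ i ∈ Finset.Ico k n, f k i) + ∑ k ∈ Finset.range (n + 1), f k n := by
        rw [Finset.sum_range_succ, Finset.sum_congr rfl h1, Finset.sum_add_distrib,
          Finset.sum_range_succ (f := fun k => f k n)]
        have : ∑ i ∈ Finset.Ico n (n + 1), f n i = f n n := by simp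
        omega
      rw [Finset.sum_range_succ, ih, hR, Finset.sum_range_succ (f := fun k => f k n)]

theorem pv_Ico_drop (nums : List Int) (k : ℕ) (hk : k ≤ nums.length) :
    ∑ i ∈ Finset.Ico k nums.length, nums.getD i 0 = (nums.drop k).sum := by
  rw [Finset.sum_Ico_eq_sub _ hk, ← pv_sum_take, ← pv_sum_take, List.take_length]
  have := List.sum_take_add_sum_drop nums k
  omega

-- ---- Python negative-index normalisation (both ports index length-(n+1) lists) ----

theorem pv_idx_norm (n : ℕ) (j : Int) (h : PySem.Raise.InRange (n + 1) j) :
    PySem.List.pyIdx? (n + 1) j = PySem.List.pyIdx? (n + 1) (pvNu n j) := by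
  obtain ⟨h1, h2⟩ := h
  have h1' : -((n : Int) + 1) ≤ j := by simpa using h1
  have h2' : j < (n : Int) + 1 := by simpa using h2
  unfold pvNu PySem.List.pyIdx?
  split_ifs <;> first | rfl | omega | (congr 1; omega)

theorem pv_getD_norm (d : List Int) (n : ℕ) (hd : d.length = n + 1) (j v : Int)
    (h : PySem.Raise.InRange (n + 1) j) :
    PySem.List.pyGetD d j v = PySem.List.pyGetD d (pvNu n j) v := by
  unfold PySem.List.pyGetD PySem.List.pyGet?
  rw [hd, pv_idx_norm n j h]

theorem pv_setD_norm (d : List Int) (n : ℕ) (hd : d.length = n + 1) (j v : Int)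
    (h : PySem.Raise.InRange (n + 1) j) :
    PySem.List.pySetD d j v = PySem.List.pySetD d (pvNu n j) v := by
  unfold PySem.List.pySetD PySem.List.pySet?
  rw [hd, pv_idx_norm n j h]

-- ---- A side ----

theorem pv_prefix (nums : List Int) :
    nums.foldl (fun ps num => ps ++ [PySem.List.pyGetD ps (-1) 0 + num]) [(0 : Int)]
      = (List.range (nums.length + 1)).map (fun j => (nums.take j).sum) := by
  induction nums using List.reverseRecOn with
  | nil => simp
  | append_singleton ns x ih =>
      rw [List.foldl_append, ih, List.foldl_cons, List.foldl_nil]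
      have hlen : (ns ++ [x]).length + 1 = (ns.length + 1) + 1 := by simp
      rw [hlen, List.range_succ (n := ns.length + 1), List.map_append]
      congr 1
      · apply List.map_congr_left
        intro j hj
        rw [List.mem_range] at hj
        rw [List.take_append_of_le_length (by omega)]
      · rw [List.range_succ (n := ns.length), List.map_append]
        simp only [List.map_cons, List.map_nil]
        rw [PySem.List.pyGetD_neg_one_append_singleton]
        rw [List.take_length, List.take_of_length_le (by simp), List.sum_append]
        simp

theorem pv_read (nums : List Int) (j : Int)
    (h : PySem.Raise.InRange (nums.length + 1) j) :
    PySem.List.pyGetD ((List.range (nums.length + 1)).map (fun j => (nums.take j).sum)) j 0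
      = (nums.take (pvNu nums.length j).toNat).sum := by
  obtain ⟨h1, h2⟩ := h
  unfold pvNu
  by_cases hj : j ≥ 0
  · rw [PySem.List.pyGetD_eq_getElem _ _ hj (by simpa using h2), if_pos hj]
    rw [List.getElem_map, List.getElem_range]
  · rw [if_neg hj]
    simp only [PySem.List.pyGetD, PySem.List.pyGet?, PySem.List.pyIdx?]
    rw [if_neg hj, if_pos (by simpa using h1)]
    simp only [List.length_map, List.length_range, Option.bind_some]
    have hlt : nums.length + 1 - (-j).toNat < nums.length + 1 := by omega
    have heq : nums.length + 1 - (-j).toNat = (j + nums.length + 1).toNat := by omega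
    rw [List.getElem?_map, List.getElem?_range (by simpa using hlt)]
    simp [heq]

theorem pv_A (nums : List Int) (queries : List (List Int))
    (hpre : Pre_solution nums queries) :
    solution nums queries = PySem.Int.mod ((queries.map (pvG nums)).sum) (10 ^ 9 + 7) := by
  unfold solution
  rw [pv_prefix]
  dsimp only
  rw [PySem.List.foldl_congr_mem queries _ (fun acc q => acc + pvG nums q) 0 ?_]
  · rw [PySem.List.foldl_add]
    simp
  · intro acc q hq
    obtain ⟨hlen, ha, hb⟩ := hpre q hq
    rw [pv_read nums _ ha, pv_read nums _ hb]
    simp only [pvG]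
    have t1 := List.sum_take_add_sum_drop nums (pvNu nums.length (PySem.List.pyGetD q 0 0)).toNat
    have t2 := List.sum_take_add_sum_drop nums (pvNu nums.length (PySem.List.pyGetD q 1 0 + 1)).toNat
    omega

-- ---- B side ----

theorem pv_cumsum (nums d : List Int) (m : ℕ) :
    (PySem.List.pyRange 0 (m : Int)).foldl (fun (tc : Int × Int) i =>
        let cover := tc.2 + PySem.List.pyGetD d i 0
        (tc.1 + cover * PySem.List.pyGetD nums i 0, cover)) ((0 : Int), (0 : Int))
      = (∑ i ∈ Finset.range m, (d.take (i + 1)).sum * nums.getD i 0, (d.take m).sum) := by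
  induction m with
  | zero => simp
  | succ m ih =>
      have hc : ((m + 1 : ℕ) : Int) = (m : Int) + 1 := by push_cast; ring
      rw [hc, PySem.List.pyRange_one_succ_right (by positivity), List.foldl_append,
        ih, List.foldl_cons, List.foldl_nil]
      simp only [PySem.List.pyGetD_natCast]
      rw [Finset.sum_range_succ]
      have hw : (d.take m).sum + d.getD m 0 = (d.take (m + 1)).sum := by
        rw [pv_sum_take, pv_sum_take, Finset.sum_range_succ]
      rw [hw]

theorem pv_W_eq (nums d : List Int) :
    ∑ i ∈ Finset.range nums.length, (d.take (i + 1)).sum * nums.getD i 0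
      = pvW nums d := by
  unfold pvW
  have h1 : ∀ i ∈ Finset.range nums.length, (d.take (i + 1)).sum * nums.getD i 0
      = ∑ k ∈ Finset.range (i + 1), d.getD k 0 * nums.getD i 0 := by
    intro i _
    rw [pv_sum_take, Finset.sum_mul]
  rw [Finset.sum_congr rfl h1, pv_swap (fun k i => d.getD k 0 * nums.getD i 0)]
  rw [Finset.sum_range_succ]
  have hzero : d.getD nums.length 0 * (nums.drop nums.length).sum = 0 := by simp
  rw [hzero, add_zero]
  apply Finset.sum_congr rfl
  intro k hk
  rw [← Finset.mul_sum, pv_Ico_drop nums k (le_of_lt (Finset.mem_range.mp hk))]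

theorem pv_W_set (nums d : List Int) (hd : d.length = nums.length + 1)
    (j : Int) (h0 : 0 ≤ j) (h1 : j < (nums.length : Int) + 1) (c : Int) :
    pvW nums (PySem.List.pySetD d j (PySem.List.pyGetD d j 0 + c))
      = pvW nums d + c * (nums.drop j.toNat).sum := by
  obtain ⟨jn, rfl⟩ : ∃ jn : ℕ, j = (jn : Int) := ⟨j.toNat, by omega⟩
  have hjl : jn < d.length := by omega
  unfold pvW
  have hterm : ∀ k ∈ Finset.range (nums.length + 1),
      (PySem.List.pySetD d (jn : Int) (PySem.List.pyGetD d (jn : Int) 0 + c)).getD k 0 * (nums.drop k).sum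
        = d.getD k 0 * (nums.drop k).sum + (if k = jn then c * (nums.drop k).sum else 0) := by
    intro k _
    rw [← PySem.List.pyGetD_natCast (PySem.List.pySetD d (jn : Int) (PySem.List.pyGetD d (jn : Int) 0 + c)) k 0,
      PySem.List.pyGetD_pySetD_natCast d jn k _ 0 hjl]
    by_cases hk : k = jn
    · subst hk
      rw [if_pos rfl, if_pos rfl, PySem.List.pyGetD_natCast]
      ring
    · rw [if_neg hk, if_neg hk, PySem.List.pyGetD_natCast, add_zero]
  rw [Finset.sum_congr rfl hterm, Finset.sum_add_distrib,
    Finset.sum_ite_eq' (Finset.range (nums.length + 1)) jn]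
  rw [if_pos (Finset.mem_range.mpr (by omega)), Int.toNat_natCast]

theorem pv_len_step (d : List Int) (q : List Int) :
    (pvStep d q).length = d.length := by
  unfold pvStep
  rw [PySem.List.length_pySetD, PySem.List.length_pySetD]

theorem pv_len_fold (d : List Int) (qs : List (List Int)) :
    (qs.foldl pvStep d).length = d.length := by
  induction qs generalizing d with
  | nil => rfl
  | cons q qs ih => rw [List.foldl_cons, ih, pv_len_step]

theorem pv_nu_bounds (n : ℕ) (j : Int) (h : PySem.Raise.InRange (n + 1) j) :
    0 ≤ pvNu n j ∧ pvNu n j < (n : Int) + 1 := by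
  obtain ⟨h1, h2⟩ := h
  have h1' : -((n : Int) + 1) ≤ j := by simpa using h1
  have h2' : j < (n : Int) + 1 := by simpa using h2
  unfold pvNu
  constructor <;> split <;> omega

theorem pv_W_step (nums : List Int) (d : List Int) (hd : d.length = nums.length + 1)
    (q : List Int)
    (ha : PySem.Raise.InRange (nums.length + 1) (PySem.List.pyGetD q 0 0))
    (hb : PySem.Raise.InRange (nums.length + 1) (PySem.List.pyGetD q 1 0 + 1)) :
    pvW nums (pvStep d q) = pvW nums d + pvG nums q := by
  obtain ⟨ha0, ha1⟩ := pv_nu_bounds nums.length _ ha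
  obtain ⟨hb0, hb1⟩ := pv_nu_bounds nums.length _ hb
  show pvW nums
      (PySem.List.pySetD
        (PySem.List.pySetD d (PySem.List.pyGetD q 0 0)
          (PySem.List.pyGetD d (PySem.List.pyGetD q 0 0) 0 + 1))
        (PySem.List.pyGetD q 1 0 + 1)
        (PySem.List.pyGetD
          (PySem.List.pySetD d (PySem.List.pyGetD q 0 0)
            (PySem.List.pyGetD d (PySem.List.pyGetD q 0 0) 0 + 1))
          (PySem.List.pyGetD q 1 0 + 1) 0 - 1))
      = pvW nums d + pvG nums q
  rw [pv_getD_norm d nums.length hd _ 0 ha, pv_setD_norm d nums.length hd _ _ ha]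
  have hd1 : (PySem.List.pySetD d (pvNu nums.length (PySem.List.pyGetD q 0 0))
      (PySem.List.pyGetD d (pvNu nums.length (PySem.List.pyGetD q 0 0)) 0 + 1)).length
      = nums.length + 1 := by
    rw [PySem.List.length_pySetD]; exact hd
  rw [pv_getD_norm _ nums.length hd1 _ 0 hb, pv_setD_norm _ nums.length hd1 _ _ hb]
  simp only [sub_eq_add_neg]
  rw [pv_W_set nums _ hd1 _ hb0 hb1 (-1)]
  rw [pv_W_set nums d hd _ ha0 ha1 1]
  unfold pvG
  ring

theorem pv_B (nums : List Int) (queries : List (List Int))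
    (hpre : Pre_solution nums queries) :
    pvW nums (queries.foldl pvStep (List.replicate (nums.length + 1) 0))
      = (queries.map (pvG nums)).sum := by
  induction queries using List.reverseRecOn with
  | nil =>
      unfold pvW
      simp only [List.foldl_nil, List.map_nil, List.sum_nil]
      apply Finset.sum_eq_zero
      intro k hk
      rw [List.getD_replicate (x := (0 : Int)) (Finset.mem_range.mp hk), zero_mul]
  | append_singleton qs q ih =>
      have hpre' : Pre_solution nums qs := by
        intro p hp; exact hpre p (List.mem_append_left _ hp)
      obtain ⟨_, ha, hb⟩ := hpre q (List.mem_append_right _ (List.mem_singleton_self q))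
      rw [List.foldl_append, List.foldl_cons, List.foldl_nil,
        pv_W_step nums _ (by rw [pv_len_fold, List.length_replicate]) q ha hb,
        ih hpre', List.map_append, List.sum_append, List.map_cons, List.map_nil, List.sum_cons,
        List.sum_nil, add_zero]

theorem pv_B_val (nums : List Int) (queries : List (List Int))
    (hpre : Pre_solution nums queries) :
    solution_alt nums queries = PySem.Int.mod ((queries.map (pvG nums)).sum) (10 ^ 9 + 7) := by
  unfold solution_alt
  have hstep : (fun (d : List Int) (query : List Int) =>
      let d1 := PySem.List.pySetD d (PySem.List.pyGetD query 0 0)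
                  (PySem.List.pyGetD d (PySem.List.pyGetD query 0 0) 0 + 1)
      PySem.List.pySetD d1 (PySem.List.pyGetD query 1 0 + 1)
        (PySem.List.pyGetD d1 (PySem.List.pyGetD query 1 0 + 1) 0 - 1)) = pvStep := by
    rfl
  simp only [hstep]
  rw [pv_cumsum nums (queries.foldl pvStep (List.replicate (nums.length + 1) 0)) nums.length]
  simp only
  rw [pv_W_eq nums _, pv_B nums queries hpre]

-- ===== VERDICT (by name: the statement is the Claim_ definition above) =====
theorem solution_spec : Claim_equal_solution := by
  intro nums queries _ hpre
  unfold Spec_solution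
  rw [pv_A nums queries hpre, pv_B_val nums queries hpre]
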